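-- pv_equiv track=rewrite | github.com/Elon379mark/Emergency_AI-hub | response_agent.py | build_immediate_actions
-- ===== SOURCE A (Python) =====
-- from typing import Dict, List
--
-- def build_immediate_actions(severity: str, treatments: List[str]) -> List[str]:
--     """
--     Build prioritized immediate action steps based on severity.
--
--     Args:
--         severity: CRITICAL / HIGH / MEDIUM / LOW
--         treatments: Knowledge graph treatment recommendations
--
--     Returns:
--         List of immediate action strings
--     """
--     # Universal first steps by severity
--     preamble = {
--         "CRITICAL": [
--             "⚠️  CALL EMERGENCY SERVICES IMMEDIATELY",
--             "Ensure scene safety before approaching victim",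
--         ],
--         "HIGH": [
--             "Request emergency medical support",
--             "Ensure scene safety",
--         ],
--         "MEDIUM": [
--             "Assess victim and begin first aid",
--         ],
--         "LOW": [
--             "Provide basic first aid",
--         ],
--     }
--
--     actions = preamble.get(severity, preamble["MEDIUM"])
--
--     # Add knowledge graph treatments as next steps
--     for treatment in treatments:
--         action = treatment.replace("_", " ").capitalize()
--         if action not in actions:
--             actions.append(action)
--
--     return actions
-- ===== SOURCE B (Python) =====
-- from typing import Dict, List
--
-- def build_immediate_actions(severity: str, treatments: List[str]) -> List[str]:
--     preamble = {
--         "CRITICAL": [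
--             "⚠️  CALL EMERGENCY SERVICES IMMEDIATELY",
--             "Ensure scene safety before approaching victim",
--         ],
--         "HIGH": [
--             "Request emergency medical support",
--             "Ensure scene safety",
--         ],
--         "MEDIUM": [
--             "Assess victim and begin first aid",
--         ],
--         "LOW": [
--             "Provide basic first aid",
--         ],
--     }
--     combined = preamble.get(severity, preamble["MEDIUM"]) + [
--         t.replace("_", " ").capitalize() for t in treatments
--     ]
--     # map each action to the index of its first occurrence, then order by that index
--     first_index: Dict[str, int] = {}
--     for i, item in enumerate(combined):
--         first_index.setdefault(item, i)
--     return [item for item, _ in sorted(first_index.items(), key=lambda kv: kv[1])]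
-- ===== Notes on version B (the rewrite author's own statement) =====
-- stated objective: faster
-- what changed: Instead of A's grow-and-scan loop (each new action linearly scanned against the accumulated list), B builds a hash map from each action to its first-occurrence index over the enumerated preamble+normalized list via dict.setdefault, then recovers the output by sorting the map's items by that index.
import Mathlib
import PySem

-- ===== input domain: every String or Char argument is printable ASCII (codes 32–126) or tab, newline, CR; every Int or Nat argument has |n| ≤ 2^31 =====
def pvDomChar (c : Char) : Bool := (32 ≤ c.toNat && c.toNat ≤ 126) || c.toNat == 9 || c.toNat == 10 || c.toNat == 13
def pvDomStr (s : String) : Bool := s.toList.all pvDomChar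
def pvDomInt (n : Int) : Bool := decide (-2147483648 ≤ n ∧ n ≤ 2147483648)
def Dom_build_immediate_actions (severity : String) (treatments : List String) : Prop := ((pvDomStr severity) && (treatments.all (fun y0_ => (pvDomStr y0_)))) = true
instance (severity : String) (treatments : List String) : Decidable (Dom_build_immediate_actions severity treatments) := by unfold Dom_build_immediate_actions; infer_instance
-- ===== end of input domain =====

-- B replaces A's grow-and-scan dedup loop by a first-occurrence index map (dict.setdefault
-- over the enumerated preamble++normalized list) followed by a sort on those indices (alternative).

-- ===== PORT A =====
-- str.capitalize(): first char upper, rest lower (exact on the ASCII domain)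
def pyCapitalize (s : String) : String :=
  match s.toList with
  | [] => ""
  | c :: rest => String.ofList (PySem.Chars.upperChar c :: rest.map PySem.Chars.lowerChar)

-- the literal preamble dict of the Python source (both sources spell it out identically)
def pvPreamble : PySem.Dict String (List String) :=
  PySem.Dict.ofList
  [("CRITICAL", ["⚠️  CALL EMERGENCY SERVICES IMMEDIATELY",
                 "Ensure scene safety before approaching victim"]),
   ("HIGH", ["Request emergency medical support", "Ensure scene safety"]),
   ("MEDIUM", ["Assess victim and begin first aid"]),
   ("LOW", ["Provide basic first aid"])]

def build_immediate_actions (severity : String) (treatments : List String) : List String :=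
  -- preamble.get(severity, preamble["MEDIUM"]); the "MEDIUM" key is present, so getD's default is unreachable
  let actions := (PySem.Dict.get? pvPreamble severity).getD (PySem.Dict.getD pvPreamble "MEDIUM" [])
  treatments.foldl (fun acc treatment =>
    let action := pyCapitalize (PySem.Str.replace treatment "_" " ")
    if acc.contains action then acc else acc ++ [action]) actions

-- ===== PORT B =====
def build_immediate_actions_alt (severity : String) (treatments : List String) : List String :=
  let combined := (PySem.Dict.get? pvPreamble severity).getD (PySem.Dict.getD pvPreamble "MEDIUM" [])
    ++ treatments.map (fun t => pyCapitalize (PySem.Str.replace t "_" " "))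
  -- first_index.setdefault(item, i) over enumerate(combined)
  let firstIndex := (PySem.List.enumerate combined 0).foldl
    (fun d p => PySem.Dict.setdefault d p.2 p.1) PySem.Dict.empty
  -- sorted(first_index.items(), key=lambda kv: kv[1]) projected to the items
  (PySem.List.sorted firstIndex.items (fun kv => kv.2) false).map (fun kv => kv.1)

-- ===== PRECONDITION & SPEC =====
def Spec_build_immediate_actions (severity : String) (treatments : List String) (out : List String) : Prop := out = build_immediate_actions_alt severity treatments
instance (severity : String) (treatments : List String) (out : List String) : Decidable (Spec_build_immediate_actions severity treatments out) := by unfold Spec_build_immediate_actions; infer_instance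

-- ===== CLAIM (what is proved, stated in full; the proofs are below) =====
def Claim_equal_build_immediate_actions : Prop := ∀ (severity : String) (treatments : List String), Dom_build_immediate_actions severity treatments → Spec_build_immediate_actions severity treatments (build_immediate_actions severity treatments)

-- ===== LEMMAS AND PROOFS =====

-- the setdefault loop over enumerate(xs, s): keys become Set.update keys xs, in first-occurrence
-- order, and the stored indices stay strictly increasing along the items list
theorem setdefault_fold_items (xs : List String) :
    ∀ (s : Int) (d : PySem.Dict String Int),
    d.items.Pairwise (fun a b => a.2 < b.2) → (∀ p ∈ d.items, p.2 < s) →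
    (((PySem.List.enumerate xs s).foldl (fun d p => PySem.Dict.setdefault d p.2 p.1) d).items.map
        (fun kv => kv.1) = PySem.Set.update (d.items.map (fun kv => kv.1)) xs)
    ∧ ((PySem.List.enumerate xs s).foldl (fun d p => PySem.Dict.setdefault d p.2 p.1) d).items.Pairwise
        (fun a b => a.2 < b.2) := by
  induction xs with
  | nil => intro s d hpw _; exact ⟨rfl, hpw⟩
  | cons x xs ih =>
    intro s d hpw hlt
    rw [PySem.List.enumerate_cons, List.foldl_cons]
    by_cases hc : d.contains x = true
    · rw [show PySem.Dict.setdefault d x s = d from PySem.Dict.setdefault_of_contains d s hc]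
      have hmem : x ∈ d.items.map (fun kv => kv.1) := by
        have := (PySem.Dict.contains_iff_mem_keys (d := d) (k := x)).mp hc
        simpa [PySem.Dict.keys] using this
      have hadd : PySem.Set.add (d.items.map (fun kv => kv.1)) x = d.items.map (fun kv => kv.1) := by
        simp [PySem.Set.add, PySem.Set.contains]
        obtain ⟨p, hp, hpx⟩ := List.mem_map.mp hmem
        exact ⟨p.2, by rw [← hpx]; simpa using hp⟩
      have := ih (s + 1) d hpw (fun p hp => by have := hlt p hp; omega)
      refine ⟨?_, this.2⟩
      rw [this.1, PySem.Set.update, PySem.Set.update, List.foldl_cons, hadd]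
    · have hset : PySem.Dict.setdefault d x s = d.insert x s :=
        PySem.Dict.setdefault_of_not_contains d s (by simpa using hc)
      have hitems : (d.insert x s).items = d.items ++ [(x, s)] :=
        PySem.Dict.items_insert_of_not_contains d s (by simpa using hc)
      have hpw' : (d.insert x s).items.Pairwise (fun a b => a.2 < b.2) := by
        rw [hitems]
        exact List.pairwise_append.mpr ⟨hpw, by simp, by intro a ha b hb; simp at hb; rw [hb]; exact hlt a ha⟩
      have hlt' : ∀ p ∈ (d.insert x s).items, p.2 < s + 1 := by
        intro p hp; rw [hitems] at hp
        rcases List.mem_append.mp hp with h | h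
        · have := hlt p h; omega
        · rw [List.mem_singleton.mp h]; show s < s + 1; omega
      have := ih (s + 1) (d.insert x s) hpw' hlt'
      rw [hset]
      refine ⟨?_, this.2⟩
      rw [this.1, hitems, PySem.Set.update, PySem.Set.update, List.foldl_cons]
      congr 1
      have hnmem : x ∉ d.items.map (fun kv => kv.1) := by
        intro hmem
        have : d.contains x = true := (PySem.Dict.contains_iff_mem_keys (d := d) (k := x)).mpr
          (by simpa [PySem.Dict.keys] using hmem)
        exact hc this
      simp [PySem.Set.add, PySem.Set.contains]
      intro y hy
      exact absurd (List.mem_map.mpr ⟨(x, y), hy, rfl⟩) hnmem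

-- B's map-then-sort pipeline computes exactly first-occurrence dedup of the combined list
theorem alt_eq_dedup (severity : String) (treatments : List String) :
    build_immediate_actions_alt severity treatments
      = PySem.List.dedup ((PySem.Dict.get? pvPreamble severity).getD (PySem.Dict.getD pvPreamble "MEDIUM" [])
          ++ treatments.map (fun t => pyCapitalize (PySem.Str.replace t "_" " "))) := by
  simp only [build_immediate_actions_alt]
  set combined := (PySem.Dict.get? pvPreamble severity).getD (PySem.Dict.getD pvPreamble "MEDIUM" [])
    ++ treatments.map (fun t => pyCapitalize (PySem.Str.replace t "_" " ")) with hcomb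
  have h := setdefault_fold_items combined 0 PySem.Dict.empty (by simp [PySem.Dict.empty]) (by simp [PySem.Dict.empty])
  have hsorted : PySem.List.sorted
      (((PySem.List.enumerate combined 0).foldl (fun d p => PySem.Dict.setdefault d p.2 p.1)
        PySem.Dict.empty).items) (fun kv => kv.2) false
      = ((PySem.List.enumerate combined 0).foldl (fun d p => PySem.Dict.setdefault d p.2 p.1)
        PySem.Dict.empty).items :=
    PySem.List.sorted_eq_self_of_pairwise _ _ (h.2.imp (fun hab => le_of_lt hab))
  rw [hsorted, h.1]
  simp [PySem.Dict.empty, PySem.Set.update, PySem.List.dedup_eq_ofList, PySem.Set.ofList_eq_foldl]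

-- deduping a list that starts with an already-duplicate-free prefix keeps that prefix and
-- continues with Set.add steps, which are exactly A's membership-guarded appends
theorem dedup_append_of_ofList_fixed {L : List String} (hL : PySem.Set.ofList L = L)
    (ts : List String) (f : String → String) :
    PySem.List.dedup (L ++ ts.map f)
      = ts.foldl (fun acc t =>
          let a := f t
          if acc.contains a then acc else acc ++ [a]) L := by
  show PySem.Set.ofList (L ++ ts.map f) = _
  rw [PySem.Set.ofList, List.foldl_append, List.foldl_map]
  rw [show List.foldl PySem.Set.add PySem.Set.empty L = L from hL]
  rfl

theorem selected_preamble_fixed (severity : String) :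
    PySem.Set.ofList ((PySem.Dict.get? pvPreamble severity).getD (PySem.Dict.getD pvPreamble "MEDIUM" []))
      = (PySem.Dict.get? pvPreamble severity).getD (PySem.Dict.getD pvPreamble "MEDIUM" []) := by
  by_cases h1 : severity = "CRITICAL"
  · subst h1; decide
  · by_cases h2 : severity = "HIGH"
    · subst h2; decide
    · by_cases h3 : severity = "MEDIUM"
      · subst h3; decide
      · by_cases h4 : severity = "LOW"
        · subst h4; decide
        · have c1 : (("CRITICAL" : String) == severity) = false := by
            simp [beq_eq_false_iff_ne]; exact fun h => h1 h.symm
          have c2 : (("HIGH" : String) == severity) = false := by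
            simp [beq_eq_false_iff_ne]; exact fun h => h2 h.symm
          have c3 : (("MEDIUM" : String) == severity) = false := by
            simp [beq_eq_false_iff_ne]; exact fun h => h3 h.symm
          have c4 : (("LOW" : String) == severity) = false := by
            simp [beq_eq_false_iff_ne]; exact fun h => h4 h.symm
          have hnone : PySem.Dict.get? pvPreamble severity = none := by
            simp only [PySem.Dict.get?, show pvPreamble.items
                = [("CRITICAL", ["⚠️  CALL EMERGENCY SERVICES IMMEDIATELY",
                                 "Ensure scene safety before approaching victim"]),
                   ("HIGH", ["Request emergency medical support", "Ensure scene safety"]),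
                   ("MEDIUM", ["Assess victim and begin first aid"]),
                   ("LOW", ["Provide basic first aid"])] from by decide,
              List.find?, c1, c2, c3, c4, Option.map_none]
          rw [hnone]; decide

-- ===== VERDICT (by name: the statement is the Claim_ definition above) =====
theorem build_immediate_actions_spec : Claim_equal_build_immediate_actions := by
  intro severity treatments _
  show build_immediate_actions severity treatments = build_immediate_actions_alt severity treatments
  rw [alt_eq_dedup, dedup_append_of_ofList_fixed (selected_preamble_fixed severity)]
  rfl
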